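-- pv_equiv track=rewrite | github.com/sahilm2306/University-projcts | q3.py | findMostFrequentFollower
-- ===== SOURCE A (Python) =====
-- def findMostFrequentFollower(word_list: list[str], target_word: str) -> str:
--
--     lower_list = [w.lower() for w in word_list]
--     target = target_word.lower()
--     follower_counts = {}
--
--     # Go through all pairs of words
--     for i in range(len(lower_list) - 1):
--         if lower_list[i] == target:
--             next_word = lower_list[i + 1]
--             follower_counts[next_word] = follower_counts.get(next_word, 0) + 1
--
--     if not follower_counts:
--         return ""
--
--     # Find the follower(s) with the highest frequency
--     max_count = max(follower_counts.values())
--     candidates = {word for word, count in follower_counts.items()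
--                   if count == max_count}
--
--     # Return whichever candidate appears last in the original list
--     for word in reversed(lower_list):
--         if word in candidates:
--             return word
--
--     return ""
-- ===== SOURCE B (Python) =====
-- def findMostFrequentFollower(word_list: list[str], target_word: str) -> str:
--     lower_list = [w.lower() for w in word_list]
--     target = target_word.lower()
--     counts = {}
--     for prev, nxt in zip(lower_list, lower_list[1:]):
--         if prev == target:
--             counts[nxt] = counts.get(nxt, 0) + 1
--     if not counts:
--         return ""
--     last_index = {w: i for i, w in enumerate(lower_list)}
--     return max(counts, key=lambda w: (counts[w], last_index[w]))
-- ===== Notes on version B (the rewrite author's own statement) =====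
-- stated objective: simpler
-- what changed: A's three passes after counting (max of values, candidate-set comprehension, reverse scan of the whole list) are replaced by one last-occurrence-index dict plus a single max over the counts keyed by the tuple (count, last index), which replicates the latest-occurrence tie-break.
import Mathlib
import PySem

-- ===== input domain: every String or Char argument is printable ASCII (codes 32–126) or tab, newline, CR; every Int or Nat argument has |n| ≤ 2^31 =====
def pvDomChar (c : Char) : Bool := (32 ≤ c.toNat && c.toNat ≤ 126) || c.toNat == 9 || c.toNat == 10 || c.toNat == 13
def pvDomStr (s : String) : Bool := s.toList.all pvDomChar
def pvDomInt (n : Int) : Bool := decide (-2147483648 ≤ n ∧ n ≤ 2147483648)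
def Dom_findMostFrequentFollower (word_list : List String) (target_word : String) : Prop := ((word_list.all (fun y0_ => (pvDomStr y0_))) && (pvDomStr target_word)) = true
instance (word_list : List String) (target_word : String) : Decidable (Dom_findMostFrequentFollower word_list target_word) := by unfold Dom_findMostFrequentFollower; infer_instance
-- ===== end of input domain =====

-- B replaces A's max-count pass, candidate-set build and reverse scan by a last-index dict and a
-- single argmax with the tuple key (count, last index) — objective: simpler.

-- ===== PORT A =====
def findMostFrequentFollower (word_list : List String) (target_word : String) : String :=
  let lower_list := word_list.map PySem.Str.lower
  let target := PySem.Str.lower target_word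
  let follower_counts : PySem.Dict String Int :=
    (PySem.List.pyRange 0 ((lower_list.length : Int) - 1) 1).foldl
      (fun d i =>
        if PySem.List.pyGetD lower_list i "" == target then
          -- the loop indices i and i+1 are always in range, so pyGetD is exact here
          let next_word := PySem.List.pyGetD lower_list (i + 1) ""
          d.insert next_word (d.getD next_word 0 + 1)
        else d)
      PySem.Dict.empty
  if follower_counts.items.isEmpty then ""
  else
    match PySem.List.max? follower_counts.values (fun v => v) with
    | none => ""   -- unreachable: the values list is nonempty here
    | some max_count =>
      let candidates : PySem.Set String :=
        follower_counts.items.foldl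
          (fun s p => if p.2 == max_count then PySem.Set.add s p.1 else s)
          PySem.Set.empty
      match lower_list.reverse.find? (fun w => PySem.Set.contains candidates w) with
      | some w => w
      | none => ""

-- ===== PORT B =====
def findMostFrequentFollower_alt (word_list : List String) (target_word : String) : String :=
  let lower_list := word_list.map PySem.Str.lower
  let target := PySem.Str.lower target_word
  let counts : PySem.Dict String Int :=
    (lower_list.zip (PySem.List.slice lower_list (some 1) none)).foldl
      (fun d p => if p.1 == target then d.insert p.2 (d.getD p.2 0 + 1) else d)
      PySem.Dict.empty
  if counts.items.isEmpty then ""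
  else
    let last_index : PySem.Dict String Int :=
      (PySem.List.enumerate lower_list).foldl
        (fun d p => d.insert p.2 p.1) PySem.Dict.empty
    -- counts[w] and last_index[w] never miss (w is a key / occurs in the list): getD is exact
    match PySem.List.max2? counts.keys
        (fun w => counts.getD w 0) (fun w => last_index.getD w 0) with
    | some w => w
    | none => ""   -- unreachable: the keys list is nonempty here

-- ===== PRECONDITION & SPEC =====
def Spec_findMostFrequentFollower (word_list : List String) (target_word : String) (out : String) : Prop := out = findMostFrequentFollower_alt word_list target_word
instance (word_list : List String) (target_word : String) (out : String) : Decidable (Spec_findMostFrequentFollower word_list target_word out) := by unfold Spec_findMostFrequentFollower; infer_instance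

-- ===== CLAIM (what is proved, stated in full; the proofs are below) =====
def Claim_equal_findMostFrequentFollower : Prop := ∀ (word_list : List String) (target_word : String), Dom_findMostFrequentFollower word_list target_word → Spec_findMostFrequentFollower word_list target_word (findMostFrequentFollower word_list target_word)

-- ===== LEMMAS AND PROOFS =====

-- A's index loop reads exactly the consecutive pairs of the list.
lemma pv_pairs_map (l : List String) :
    (PySem.List.pyRange 0 ((l.length : Int) - 1) 1).map
      (fun i => (PySem.List.pyGetD l i "", PySem.List.pyGetD l (i + 1) "")) =
    l.zip (l.drop 1) := by
  apply List.ext_getElem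
  · simp [PySem.List.length_pyRange_one]
  · intro k h1 h2
    have hk : k < l.length - 1 := by
      simp [PySem.List.length_pyRange_one] at h1; omega
    simp only [List.getElem_map, PySem.List.getElem_pyRange_one, List.getElem_zip,
      List.getElem_drop, zero_add]
    have e2 : ((k : Int) + 1) = (((k + 1) : Nat) : Int) := by push_cast; ring
    rw [e2, PySem.List.pyGetD_natCast, PySem.List.pyGetD_natCast]
    congr 1
    · rw [List.getD_eq_getElem?_getD, List.getElem?_eq_getElem (by omega)]; rfl
    · rw [List.getD_eq_getElem?_getD, List.getElem?_eq_getElem (by omega)]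
      simp [Nat.add_comm]

-- the counting fold keeps the keys Nodup
lemma pv_nodup (t : String) (P : List (String × String)) (d : PySem.Dict String Int)
    (h : d.keys.Nodup) :
    (P.foldl (fun d p => if p.1 == t then d.insert p.2 (d.getD p.2 0 + 1) else d) d).keys.Nodup := by
  induction P generalizing d with
  | nil => exact h
  | cons p P ih =>
    simp only [List.foldl_cons]
    split
    · exact ih _ (PySem.Dict.nodup_keys_insert _ _ _ h)
    · exact ih _ h

-- every key of the counting fold comes from the initial dict or is a second pair component
lemma pv_keys_sub (t : String) (P : List (String × String)) (d : PySem.Dict String Int) (k : String)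
    (h : k ∈ (P.foldl (fun d p => if p.1 == t then d.insert p.2 (d.getD p.2 0 + 1) else d) d).keys) :
    k ∈ d.keys ∨ k ∈ P.map Prod.snd := by
  induction P generalizing d with
  | nil => exact Or.inl h
  | cons p P ih =>
    simp only [List.foldl_cons] at h
    simp only [List.map_cons, List.mem_cons]
    by_cases hc : (p.1 == t) = true
    · rw [if_pos hc] at h
      rcases ih _ h with h' | h'
      · rcases (PySem.Dict.mem_keys_insert _ _ _ _).mp h' with h'' | h''
        · exact Or.inr (Or.inl h'')
        · exact Or.inl h''
      · exact Or.inr (Or.inr h')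
    · rw [if_neg hc] at h
      rcases ih _ h with h' | h'
      · exact Or.inl h'
      · exact Or.inr (Or.inr h')

-- the last_index dict maps each member of l to the position of its last occurrence
lemma pv_last_spec (l : List String) (w : String) (hw : w ∈ l) :
    ∃ (k : Nat) (hk : k < l.length), l[k] = w ∧
      ((PySem.List.enumerate l).foldl (fun d p => d.insert p.2 p.1)
        (PySem.Dict.empty : PySem.Dict String Int)).get? w = some (k : Int) ∧
      ∀ (j : Nat) (hj : j < l.length), k < j → l[j] = w → False := by
  induction l using List.reverseRecOn with
  | nil => simp at hw
  | append_singleton xs x ih =>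
    have hfold : ((PySem.List.enumerate (xs ++ [x])).foldl (fun d p => d.insert p.2 p.1)
        (PySem.Dict.empty : PySem.Dict String Int)) =
        ((PySem.List.enumerate xs).foldl (fun d p => d.insert p.2 p.1)
          (PySem.Dict.empty : PySem.Dict String Int)).insert x (xs.length : Int) := by
      rw [PySem.List.enumerate_append, List.foldl_append]
      simp [PySem.List.enumerate]
    by_cases hx : w = x
    · subst hx
      refine ⟨xs.length, by simp, by simp, ?_, ?_⟩
      · rw [hfold, PySem.Dict.get?_insert_self]
      · intro j hj h1 _; simp at hj; omega
    · have hw' : w ∈ xs := by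
        rcases List.mem_append.mp hw with h | h
        · exact h
        · simp at h; exact absurd h hx
      obtain ⟨k, hk, hlk, hget, hmax⟩ := ih hw'
      refine ⟨k, by simp; omega, ?_, ?_, ?_⟩
      · rw [List.getElem_append_left hk]; exact hlk
      · rw [hfold, PySem.Dict.get?_insert_of_ne _ _ hx]; exact hget
      · intro j hj h1 hje
        simp at hj
        by_cases hjl : j < xs.length
        · rw [List.getElem_append_left hjl] at hje
          exact hmax j hjl h1 hje
        · have : j = xs.length := by omega
          subst this
          rw [List.getElem_append_right (le_refl _)] at hje
          simp at hje
          exact hx hje.symm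

-- Python's max with a two-component key: the result is a member and lexicographically maximal
lemma pv_max2_aux {α : Type} (k1 k2 : α → Int) (xs : List α) (m b : α)
    (h : xs.foldl (fun acc x =>
        match acc with
        | none => some x
        | some m =>
          if (decide (k1 m < k1 x) || !decide (k1 x < k1 m) && decide (k2 m < k2 x)) = true
          then some x else some m) (some m) = some b) :
    (b = m ∨ b ∈ xs) ∧ (k1 m < k1 b ∨ (k1 m = k1 b ∧ k2 m ≤ k2 b)) ∧
      ∀ y ∈ xs, k1 y < k1 b ∨ (k1 y = k1 b ∧ k2 y ≤ k2 b) := by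
  induction xs generalizing m with
  | nil =>
    simp at h
    subst h
    exact ⟨Or.inl rfl, Or.inr ⟨rfl, le_refl _⟩, by simp⟩
  | cons x xs ih =>
    simp only [List.foldl_cons] at h
    by_cases hc : (decide (k1 m < k1 x) || !decide (k1 x < k1 m) && decide (k2 m < k2 x)) = true
    · rw [if_pos hc] at h
      obtain ⟨hmem, hrel, hall⟩ := ih x h
      have hmx : k1 m < k1 x ∨ (k1 m = k1 x ∧ k2 m ≤ k2 x) := by
        simp at hc; omega
      refine ⟨?_, by omega, ?_⟩
      · rcases hmem with h' | h'
        · subst h'; exact Or.inr (List.mem_cons_self ..)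
        · exact Or.inr (List.mem_cons_of_mem _ h')
      · intro y hy
        rcases List.mem_cons.mp hy with h' | h'
        · subst h'; omega
        · exact hall y h'
    · rw [if_neg hc] at h
      obtain ⟨hmem, hrel, hall⟩ := ih m h
      have hxm : k1 x < k1 b ∨ (k1 x = k1 b ∧ k2 x ≤ k2 b) := by
        simp at hc; omega
      refine ⟨?_, hrel, ?_⟩
      · rcases hmem with h' | h'
        · exact Or.inl h'
        · exact Or.inr (List.mem_cons_of_mem _ h')
      · intro y hy
        rcases List.mem_cons.mp hy with h' | h'
        · subst h'; exact hxm
        · exact hall y h'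

lemma pv_max2_spec {α : Type} (k1 k2 : α → Int) (xs : List α) (b : α)
    (h : PySem.List.max2? xs k1 k2 = some b) :
    b ∈ xs ∧ ∀ y ∈ xs, k1 y < k1 b ∨ (k1 y = k1 b ∧ k2 y ≤ k2 b) := by
  cases xs with
  | nil => simp [PySem.List.max2?] at h
  | cons x xs =>
    simp only [PySem.List.max2?, List.foldl_cons] at h
    obtain ⟨hmem, hrel, hall⟩ := pv_max2_aux k1 k2 xs x b h
    refine ⟨?_, ?_⟩
    · rcases hmem with h' | h'
      · subst h'; exact List.mem_cons_self ..
      · exact List.mem_cons_of_mem _ h'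
    · intro y hy
      rcases List.mem_cons.mp hy with h' | h'
      · subst h'; exact hrel
      · exact hall y h'

lemma pv_max2_aux2 {α : Type} (k1 k2 : α → Int) (xs : List α) (m : α) :
    ∃ b, xs.foldl (fun acc x =>
        match acc with
        | none => some x
        | some m =>
          if (decide (k1 m < k1 x) || !decide (k1 x < k1 m) && decide (k2 m < k2 x)) = true
          then some x else some m) (some m) = some b := by
  induction xs generalizing m with
  | nil => exact ⟨m, rfl⟩
  | cons x xs ih =>
    simp only [List.foldl_cons]
    by_cases hc : (decide (k1 m < k1 x) || !decide (k1 x < k1 m) && decide (k2 m < k2 x)) = true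
    · rw [if_pos hc]; exact ih x
    · rw [if_neg hc]; exact ih m

lemma pv_max2_some {α : Type} (k1 k2 : α → Int) (x : α) (xs : List α) :
    ∃ b, PySem.List.max2? (x :: xs) k1 k2 = some b := by
  simp only [PySem.List.max2?, List.foldl_cons]
  exact pv_max2_aux2 k1 k2 xs x

-- membership in the candidate set built by the fold
lemma pv_cand_mem (M : Int) (items : List (String × Int)) (s0 : PySem.Set String) (w : String) :
    w ∈ items.foldl (fun s p => if p.2 == M then PySem.Set.add s p.1 else s) s0 ↔
      w ∈ s0 ∨ ∃ p ∈ items, p.2 = M ∧ p.1 = w := by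
  induction items generalizing s0 with
  | nil => simp
  | cons q items ih =>
    simp only [List.foldl_cons]
    by_cases hq : (q.2 == M) = true
    · rw [if_pos hq]
      rw [ih]
      simp only [PySem.Set.mem_add, List.mem_cons]
      constructor
      · rintro (⟨h | h⟩ | ⟨p, hp, h1, h2⟩)
        · exact Or.inl h
        · exact Or.inr ⟨q, Or.inl rfl, by simpa using hq, h.symm⟩
        · exact Or.inr ⟨p, Or.inr hp, h1, h2⟩
      · rintro (h | ⟨p, hp | hp, h1, h2⟩)
        · exact Or.inl (Or.inl h)
        · subst hp; exact Or.inl (Or.inr h2.symm)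
        · exact Or.inr ⟨p, hp, h1, h2⟩
    · rw [if_neg hq]
      rw [ih]
      simp only [List.mem_cons]
      constructor
      · rintro (h | ⟨p, hp, h1, h2⟩)
        · exact Or.inl h
        · exact Or.inr ⟨p, Or.inr hp, h1, h2⟩
      · rintro (h | ⟨p, hp | hp, h1, h2⟩)
        · exact Or.inl h
        · subst hp; simp [h1] at hq
        · exact Or.inr ⟨p, hp, h1, h2⟩

-- the reverse scan returns an element whose last occurrence is not earlier than that of
-- any other element satisfying the predicate
lemma pv_find_rev_le (l : List String) (p : String → Bool) (r : String)
    (hr : l.reverse.find? p = some r)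
    (w : String) (hpw : p w = true)
    (kw : Nat) (hkw : kw < l.length) (hlw : l[kw] = w)
    (kr : Nat)
    (hmax : ∀ (j : Nat) (hj : j < l.length), kr < j → l[j] = r → False) :
    kw ≤ kr := by
  obtain ⟨hpr, as, bs, hdec, has⟩ := List.find?_eq_some_iff_append.mp hr
  have hl : l = bs.reverse ++ r :: as.reverse := by
    have := congrArg List.reverse hdec
    simpa using this
  have hlen : l.length = bs.length + 1 + as.length := by
    rw [hl]; simp; omega
  have hp0 : bs.length < l.length := by omega
  have e0 : l[bs.length]? = some r := by
    rw [hl, List.getElem?_append_right (by simp)]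
    simp
  have ha : bs.length ≤ kr := by
    by_contra hcon
    obtain ⟨h', he⟩ := List.getElem?_eq_some_iff.mp e0
    exact hmax bs.length h' (by omega) he
  have hb : kw ≤ bs.length := by
    by_contra hcon
    have h2 : l[kw]? = some w := by
      rw [List.getElem?_eq_getElem hkw, hlw]
    rw [hl, List.getElem?_append_right (by simp; omega)] at h2
    have h3 : kw - bs.reverse.length = (kw - bs.length - 1) + 1 := by simp; omega
    rw [h3, List.getElem?_cons_succ] at h2
    have h4 : w ∈ as.reverse := List.mem_of_getElem? h2
    have := has w (by simpa using h4)
    simp [hpw] at this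
  omega

lemma pv_main (word_list : List String) (target_word : String) :
    findMostFrequentFollower word_list target_word =
    findMostFrequentFollower_alt word_list target_word := by
  unfold findMostFrequentFollower findMostFrequentFollower_alt
  dsimp only
  rw [PySem.List.slice_from _ (by norm_num : (0:Int) ≤ 1)]
  simp only [Int.toNat_one]
  set l := word_list.map PySem.Str.lower with hldef
  set t := PySem.Str.lower target_word with htdef
  have hAB : (List.foldl
        (fun d i =>
          if (PySem.List.pyGetD l i "" == t) = true then
            d.insert (PySem.List.pyGetD l (i + 1) "") (d.getD (PySem.List.pyGetD l (i + 1) "") 0 + 1)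
          else d)
        (PySem.Dict.empty : PySem.Dict String Int) (PySem.List.pyRange 0 ((l.length : Int) - 1))) =
      (List.foldl (fun d (p : String × String) =>
          if (p.1 == t) = true then d.insert p.2 (d.getD p.2 0 + 1) else d)
        (PySem.Dict.empty : PySem.Dict String Int) (l.zip (l.drop 1))) := by
    rw [← pv_pairs_map l, List.foldl_map]
  rw [hAB]
  set c := (List.foldl (fun d (p : String × String) =>
      if (p.1 == t) = true then d.insert p.2 (d.getD p.2 0 + 1) else d)
    (PySem.Dict.empty : PySem.Dict String Int) (l.zip (l.drop 1))) with hcdef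
  by_cases hemp : c.items = []
  · have he : c.items.isEmpty = true := by rw [List.isEmpty_iff]; exact hemp
    rw [he]
    rfl
  · have hne : c.items.isEmpty = false := by
      rw [List.isEmpty_eq_false_iff]; exact hemp
    rw [hne]
    simp only [Bool.false_eq_true, if_false]
    -- basic facts about c
    have hnodup : c.keys.Nodup := by
      rw [hcdef]; exact pv_nodup t _ _ PySem.Dict.nodup_keys_empty
    have hkeys_l : ∀ k ∈ c.keys, k ∈ l := by
      intro k hk
      rw [hcdef] at hk
      rcases pv_keys_sub t _ _ k hk with h | h
      · simp [PySem.Dict.empty] at h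
      · obtain ⟨p, hp, hpk⟩ := List.mem_map.mp h
        have := (List.of_mem_zip hp).2
        exact List.mem_of_mem_drop (hpk ▸ this)
    have hget : ∀ w ∈ c.keys, c.get? w = some (c.getD w 0) := by
      intro w hw
      have hcont : c.contains w = true := (PySem.Dict.contains_iff_mem_keys _ _).mpr hw
      rw [PySem.Dict.contains_eq_isSome_get?] at hcont
      obtain ⟨v, hv⟩ := Option.isSome_iff_exists.mp hcont
      rw [hv, PySem.Dict.getD_of_get?_eq_some _ _ hv]
    -- the maximal count M
    have hvalsne : c.values ≠ [] := by
      simp only [PySem.Dict.values]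
      simp [hemp]
    obtain ⟨M, hM⟩ : ∃ M, PySem.List.max? c.values (fun v => v) = some M := by
      cases h : PySem.List.max? c.values (fun v => v) with
      | none => exact absurd ((PySem.List.max?_eq_none_iff _ _).mp h) hvalsne
      | some M => exact ⟨M, rfl⟩
    rw [hM]
    have hvalmap : c.values = c.keys.map (fun k => c.getD k 0) :=
      PySem.Dict.values_eq_map_keys c hnodup 0
    obtain ⟨w0, hw0k, hw0⟩ : ∃ w0 ∈ c.keys, c.getD w0 0 = M := by
      have := PySem.List.max?_mem hM
      rw [hvalmap] at this
      obtain ⟨w0, h1, h2⟩ := List.mem_map.mp this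
      exact ⟨w0, h1, h2⟩
    have hle : ∀ w ∈ c.keys, c.getD w 0 ≤ M := by
      intro w hw
      have : c.getD w 0 ∈ c.values := by
        rw [hvalmap]; exact List.mem_map.mpr ⟨w, hw, rfl⟩
      exact PySem.List.max?_isMax hM _ this
    -- candidate-set membership in terms of c
    have hcand : ∀ w, ((List.foldl (fun s p => if (p.2 == M) = true then PySem.Set.add s p.1 else s)
        PySem.Set.empty c.items).contains w = true) ↔ (w ∈ c.keys ∧ c.getD w 0 = M) := by
      intro w
      rw [PySem.Set.contains_iff, pv_cand_mem]
      constructor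
      · rintro (h | ⟨p, hp, h1, h2⟩)
        · simp [PySem.Set.empty] at h
        · have hmem : (w, M) ∈ c.items := by
            have : p = (w, M) := by
              cases p; simp_all
            exact this ▸ hp
          have hg : c.get? w = some M := (PySem.Dict.get?_eq_some_iff_mem_items _ _ _ hnodup).mpr hmem
          exact ⟨PySem.Dict.mem_keys_of_mem_items c hmem, PySem.Dict.getD_of_get?_eq_some _ _ hg⟩
      · rintro ⟨hwk, hwM⟩
        have hg : c.get? w = some M := by rw [hget w hwk, hwM]
        exact Or.inr ⟨(w, M), (PySem.Dict.get?_eq_some_iff_mem_items _ _ _ hnodup).mp hg, rfl, rfl⟩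
    -- B side: the argmax
    have hkeysne : c.keys ≠ [] := by
      simp only [PySem.Dict.keys]
      simp [hemp]
    obtain ⟨x0, xs0, hx0⟩ := List.exists_cons_of_ne_nil hkeysne
    obtain ⟨b, hb⟩ : ∃ b, PySem.List.max2? c.keys
        (fun w => c.getD w 0)
        (fun w => (List.foldl (fun d p => d.insert p.2 p.1) PySem.Dict.empty (PySem.List.enumerate l)).getD w 0) = some b := by
      rw [hx0]; exact pv_max2_some _ _ _ _
    rw [hb]
    dsimp only
    obtain ⟨hbK, hball⟩ := pv_max2_spec _ _ _ _ hb
    have hbM : c.getD b 0 = M := by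
      rcases hball w0 hw0k with h | h
      · have := hle b hbK; omega
      · omega
    -- A side: the reverse find succeeds
    have hpw0 : ((List.foldl (fun s p => if (p.2 == M) = true then PySem.Set.add s p.1 else s)
        PySem.Set.empty c.items).contains w0 = true) := (hcand w0).mpr ⟨hw0k, hw0⟩
    obtain ⟨r, hr⟩ : ∃ r, List.find? (fun w =>
        (List.foldl (fun s p => if (p.2 == M) = true then PySem.Set.add s p.1 else s)
          PySem.Set.empty c.items).contains w) l.reverse = some r := by
      have : ∃ x ∈ l.reverse, ((List.foldl (fun s p => if (p.2 == M) = true then PySem.Set.add s p.1 else s)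
          PySem.Set.empty c.items).contains x = true) :=
        ⟨w0, List.mem_reverse.mpr (hkeys_l w0 hw0k), hpw0⟩
      rw [← List.find?_isSome] at this
      exact Option.isSome_iff_exists.mp this
    rw [hr]
    dsimp only
    -- now both sides are the literals r and b; show r = b
    have hpr := List.find?_some hr
    obtain ⟨hrK, hrM⟩ := (hcand r).mp hpr
    have hrl : r ∈ l := hkeys_l r hrK
    have hbl : b ∈ l := hkeys_l b hbK
    obtain ⟨kr, hkr, hlkr, hgetr, hmaxr⟩ := pv_last_spec l r hrl
    obtain ⟨kb, hkb, hlkb, hgetb, hmaxb⟩ := pv_last_spec l b hbl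
    have hDr : (List.foldl (fun d p => d.insert p.2 p.1) PySem.Dict.empty (PySem.List.enumerate l)).getD r 0 = (kr : Int) :=
      PySem.Dict.getD_of_get?_eq_some _ _ hgetr
    have hDb : (List.foldl (fun d p => d.insert p.2 p.1) PySem.Dict.empty (PySem.List.enumerate l)).getD b 0 = (kb : Int) :=
      PySem.Dict.getD_of_get?_eq_some _ _ hgetb
    -- kb ≤ kr via the reverse scan
    have hpb : ((List.foldl (fun s p => if (p.2 == M) = true then PySem.Set.add s p.1 else s)
        PySem.Set.empty c.items).contains b = true) := (hcand b).mpr ⟨hbK, hbM⟩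
    have h1 : kb ≤ kr := pv_find_rev_le l _ r hr b hpb kb hkb hlkb kr hmaxr
    -- kr ≤ kb via the argmax
    have h2 : kr ≤ kb := by
      rcases hball r hrK with h | h
      · rw [hrM, hbM] at h; omega
      · obtain ⟨_, h⟩ := h
        rw [hDr, hDb] at h
        exact_mod_cast h
    have heq : kr = kb := le_antisymm h2 h1
    subst heq
    rw [← hlkr, ← hlkb]

-- ===== VERDICT (by name: the statement is the Claim_ definition above) =====
theorem findMostFrequentFollower_spec : Claim_equal_findMostFrequentFollower := by
  intro word_list target_word _
  unfold Spec_findMostFrequentFollower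
  exact pv_main word_list target_word
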